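-- pv_equiv track=rewrite | github.com/mitisme/Optimal-Groups-Survey | ComS_402/new_matching_algorithm.py | count_no_positive_teammates
-- ===== SOURCE A (Python) =====
-- def count_no_positive_teammates(groups, prefs):
--     count = 0
--     students_with_prefs = [student for (student, student2), score in prefs.items() if score > 0]
--
--     for group in groups:
--         for student in group:
--             pref_exists = False
--             for teammate in group:
--                 if prefs.get((student, teammate), 0) > 0:
--                     pref_exists = True
--                     break
--             if not pref_exists and student in students_with_prefs:
--                 count += 1
--     return count
-- ===== SOURCE B (Python) =====
-- def count_no_positive_teammates(groups, prefs):
--     pos_pairs = [pair for pair, score in prefs.items() if score > 0]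
--     pref_holders = {s1 for s1, _ in pos_pairs}
--     total = 0
--     for group in groups:
--         gset = set(group)
--         sat = {s1 for s1, s2 in pos_pairs if s2 in gset}
--         total += sum(1 for s in group if s in pref_holders and s not in sat)
--     return total
-- ===== Notes on version B (the rewrite author's own statement) =====
-- stated objective: faster
-- what changed: Instead of A's per-student inner scan over the group (one dict lookup per (student, teammate) pair) followed by a linear membership scan of a students_with_prefs list, B extracts the positive-preference pairs once, builds the set of preference holders once, and per group builds the set of students satisfied inside that group by one pass over the positive pairs, then counts the group's students via two O(1) set-membership tests.
import Mathlib
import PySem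

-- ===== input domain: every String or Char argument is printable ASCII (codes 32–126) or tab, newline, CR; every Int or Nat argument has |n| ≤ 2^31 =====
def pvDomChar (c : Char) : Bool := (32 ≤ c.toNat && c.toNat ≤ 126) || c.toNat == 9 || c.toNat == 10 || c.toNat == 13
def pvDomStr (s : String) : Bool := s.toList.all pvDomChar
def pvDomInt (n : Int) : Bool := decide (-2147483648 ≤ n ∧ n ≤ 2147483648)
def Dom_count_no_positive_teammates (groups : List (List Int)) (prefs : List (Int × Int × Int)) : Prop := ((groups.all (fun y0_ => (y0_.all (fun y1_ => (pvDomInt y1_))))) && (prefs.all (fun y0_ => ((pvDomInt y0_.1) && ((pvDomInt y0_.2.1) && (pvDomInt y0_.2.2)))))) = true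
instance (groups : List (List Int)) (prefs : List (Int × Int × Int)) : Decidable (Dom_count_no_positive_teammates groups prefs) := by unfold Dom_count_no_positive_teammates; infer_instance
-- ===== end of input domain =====

-- B drops A's per-student inner scan over the group: it extracts the positive pairs once and,
-- per group, builds the set of students satisfied inside that group in one pass over those pairs.

-- ===== PORT A =====
-- the dict parameter arrives as a triple list; both ports decode it the way Python builds the dict
def count_no_positive_teammates (groups : List (List Int)) (prefs : List (Int × Int × Int)) : Int :=
  let d : PySem.Dict (Int × Int) Int :=
    PySem.Dict.ofList (prefs.map (fun t => ((t.1, t.2.1), t.2.2)))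
  let students_with_prefs : List Int :=
    d.items.filterMap (fun kv => if kv.2 > 0 then some kv.1.1 else none)
  groups.foldl (fun count group =>
    group.foldl (fun count student =>
      -- 'for teammate in group: … break' computing a flag = List.any
      let pref_exists := group.any (fun teammate => d.getD (student, teammate) 0 > 0)
      if !pref_exists && students_with_prefs.contains student then count + 1 else count)
      count) 0

-- ===== PORT B =====
def count_no_positive_teammates_alt (groups : List (List Int)) (prefs : List (Int × Int × Int)) : Int :=
  let d : PySem.Dict (Int × Int) Int :=
    PySem.Dict.ofList (prefs.map (fun t => ((t.1, t.2.1), t.2.2)))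
  let pos_pairs : List (Int × Int) :=
    d.items.filterMap (fun kv => if kv.2 > 0 then some kv.1 else none)
  let pref_holders : PySem.Set Int := PySem.Set.ofList (pos_pairs.map Prod.fst)
  groups.foldl (fun total group =>
    let gset : PySem.Set Int := PySem.Set.ofList group
    let sat : PySem.Set Int :=
      PySem.Set.ofList ((pos_pairs.filter (fun p => gset.contains p.2)).map Prod.fst)
    total + (group.countP
      (fun s => pref_holders.contains s && !sat.contains s) : Int)) 0

-- ===== PRECONDITION & SPEC =====
def Spec_count_no_positive_teammates (groups : List (List Int)) (prefs : List (Int × Int × Int)) (out : Int) : Prop := out = count_no_positive_teammates_alt groups prefs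
instance (groups : List (List Int)) (prefs : List (Int × Int × Int)) (out : Int) : Decidable (Spec_count_no_positive_teammates groups prefs out) := by unfold Spec_count_no_positive_teammates; infer_instance

-- ===== CLAIM =====
def Claim_equal_count_no_positive_teammates : Prop := ∀ (groups : List (List Int)) (prefs : List (Int × Int × Int)), Dom_count_no_positive_teammates groups prefs → Spec_count_no_positive_teammates groups prefs (count_no_positive_teammates groups prefs)

-- ===== LEMMAS AND PROOFS =====

-- A's counting loop over a group is count + countP
theorem pvFoldl_count (p : Int → Bool) (group : List Int) (count : Int) :
    group.foldl (fun c s => if p s then c + 1 else c) count = count + (group.countP p : Int) := by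
  induction group generalizing count with
  | nil => simp
  | cons s group ih =>
    rw [List.foldl_cons, ih, List.countP_cons]
    by_cases h : p s = true <;> simp [h] <;> omega

-- positive dict lookup = positive entry in the items list (unique keys)
theorem pvGetD_pos_iff (d : PySem.Dict (Int × Int) Int) (hnd : d.keys.Nodup) (k : Int × Int) :
    0 < d.getD k 0 ↔ ∃ v, (k, v) ∈ d.items ∧ 0 < v := by
  constructor
  · intro h
    rcases hget : d.get? k with _ | v
    · rw [PySem.Dict.getD_of_get?_eq_none d 0 hget] at h
      omega
    · exact ⟨v, PySem.Dict.mem_items_of_get?_eq_some d hget,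
        by rwa [PySem.Dict.getD_of_get?_eq_some d 0 hget] at h⟩
  · rintro ⟨v, hmem, hv⟩
    rwa [PySem.Dict.getD_of_mem_items d hmem hnd 0]

-- A's students_with_prefs membership test = B's pref_holders membership test
theorem pvHolders_eq (L : List ((Int × Int) × Int)) (s : Int) :
    (L.filterMap (fun kv => if kv.2 > 0 then some kv.1.1 else none)).contains s =
    (PySem.Set.ofList ((L.filterMap (fun kv => if kv.2 > 0 then some kv.1 else none)).map Prod.fst)).contains s := by
  rw [Bool.eq_iff_iff]
  simp only [PySem.Set.contains_eq_listContains, List.contains_iff_exists_mem_beq,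
    PySem.Set.mem_ofList, beq_iff_eq, List.mem_map, List.mem_filterMap]
  constructor
  · rintro ⟨a, ⟨⟨⟨x, y⟩, v⟩, hkv, hif⟩, rfl⟩
    by_cases hv : v > 0
    · simp only [if_pos hv, Option.some.injEq] at hif
      subst hif
      exact ⟨x, ⟨(x, y), ⟨((x, y), v), hkv, by simp [hv]⟩, rfl⟩, rfl⟩
    · simp [hv] at hif
  · rintro ⟨a, ⟨p, ⟨⟨⟨x, y⟩, v⟩, hkv, hif⟩, rfl⟩, rfl⟩
    by_cases hv : v > 0
    · simp only [if_pos hv, Option.some.injEq] at hif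
      subst hif
      exact ⟨x, ⟨((x, y), v), hkv, by simp [hv]⟩, rfl⟩
    · simp [hv] at hif

-- B's per-group satisfied set = A's inner teammate scan
theorem pvSat_eq (d : PySem.Dict (Int × Int) Int) (hnd : d.keys.Nodup) (group : List Int) (s : Int) :
    (PySem.Set.ofList (((d.items.filterMap (fun kv => if kv.2 > 0 then some kv.1 else none)).filter
        (fun p => (PySem.Set.ofList group).contains p.2)).map Prod.fst)).contains s
      = group.any (fun teammate => d.getD (s, teammate) 0 > 0) := by
  rw [Bool.eq_iff_iff]
  simp only [PySem.Set.contains_eq_listContains, List.contains_iff_exists_mem_beq,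
    PySem.Set.mem_ofList, beq_iff_eq, List.mem_map, List.mem_filter, List.mem_filterMap,
    List.any_eq_true, decide_eq_true_eq]
  constructor
  · rintro ⟨a, ⟨⟨x, y⟩, ⟨⟨⟨⟨x', y'⟩, v⟩, hkv, hif⟩, hg⟩, rfl⟩, rfl⟩
    by_cases hv : v > 0
    · simp only [if_pos hv, Option.some.injEq, Prod.mk.injEq] at hif
      obtain ⟨rfl, rfl⟩ := hif
      refine ⟨y', ?_, (pvGetD_pos_iff d hnd (x', y')).mpr ⟨v, hkv, hv⟩⟩
      simpa [PySem.Set.contains_eq_listContains, List.contains_iff_exists_mem_beq,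
        PySem.Set.mem_ofList] using hg
    · simp [hv] at hif
  · rintro ⟨t, ht, hpos⟩
    rcases (pvGetD_pos_iff d hnd (s, t)).mp hpos with ⟨v, hmem, hv⟩
    refine ⟨s, ⟨(s, t), ⟨⟨((s, t), v), hmem, by simp [hv]⟩, ?_⟩, rfl⟩, rfl⟩
    simpa [PySem.Set.contains_eq_listContains, List.contains_iff_exists_mem_beq,
      PySem.Set.mem_ofList] using ht

theorem count_no_positive_teammates_eq (groups : List (List Int)) (prefs : List (Int × Int × Int)) :
    count_no_positive_teammates groups prefs = count_no_positive_teammates_alt groups prefs := by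
  unfold count_no_positive_teammates count_no_positive_teammates_alt
  set d : PySem.Dict (Int × Int) Int :=
    PySem.Dict.ofList (prefs.map (fun t => ((t.1, t.2.1), t.2.2))) with hd
  have hnd : d.keys.Nodup := PySem.Dict.nodup_keys_ofList _
  simp only
  congr 1
  funext count group
  trans (group.foldl (fun c s =>
    if (PySem.Set.ofList ((d.items.filterMap (fun kv => if kv.2 > 0 then some kv.1 else none)).map Prod.fst)).contains s &&
       !(PySem.Set.ofList (((d.items.filterMap (fun kv => if kv.2 > 0 then some kv.1 else none)).filter
           (fun p => (PySem.Set.ofList group).contains p.2)).map Prod.fst)).contains s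
    then c + 1 else c) count)
  · apply PySem.List.foldl_congr_mem
    intro c s _
    show (if _ then c + 1 else c) = (if _ then c + 1 else c)
    rw [pvHolders_eq, pvSat_eq d hnd group s, Bool.and_comm]
  · exact pvFoldl_count _ group count

-- ===== VERDICT =====
theorem count_no_positive_teammates_spec : Claim_equal_count_no_positive_teammates := by
  intro groups prefs _
  unfold Spec_count_no_positive_teammates
  exact count_no_positive_teammates_eq groups prefs
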